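-- pv_equiv track=rewrite | github.com/roberttgit/comp4336_23t3_ass | asswifi.py | extract_gps_data
-- ===== SOURCE A (Python) =====
-- def extract_gps_data(bulk_data):
--     latitude = ""
--     longitude = ""
--     accuracy = ""
--
--
--     for line in bulk_data:
--         if line.startswith("Latitude           : "):
--             latitude = line[21:]
--         if line.startswith("Longitude          : "):
--             longitude = line[21:]
--         if line.startswith("HorizontalAccuracy : "):
--             accuracy = line[21:]
--
--     return {"latitude":latitude.strip(), "longitude":longitude.strip(), "accuracy":accuracy.strip()}
-- ===== SOURCE B (Python) =====
-- def extract_gps_data(bulk_data):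
--     def last_value(prefix):
--         val = ""
--         for line in bulk_data:
--             if line.startswith(prefix):
--                 val = line[21:]
--         return val.strip()
--     return {"latitude": last_value("Latitude           : "),
--             "longitude": last_value("Longitude          : "),
--             "accuracy": last_value("HorizontalAccuracy : ")}
-- ===== Notes on version B (the rewrite author's own statement) =====
-- stated objective: simpler
-- what changed: Replaces A's single pass maintaining three accumulator variables with a small helper that scans the lines once per prefix and returns the stripped value of the last matching line, called three times to build the dict.
import Mathlib
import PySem

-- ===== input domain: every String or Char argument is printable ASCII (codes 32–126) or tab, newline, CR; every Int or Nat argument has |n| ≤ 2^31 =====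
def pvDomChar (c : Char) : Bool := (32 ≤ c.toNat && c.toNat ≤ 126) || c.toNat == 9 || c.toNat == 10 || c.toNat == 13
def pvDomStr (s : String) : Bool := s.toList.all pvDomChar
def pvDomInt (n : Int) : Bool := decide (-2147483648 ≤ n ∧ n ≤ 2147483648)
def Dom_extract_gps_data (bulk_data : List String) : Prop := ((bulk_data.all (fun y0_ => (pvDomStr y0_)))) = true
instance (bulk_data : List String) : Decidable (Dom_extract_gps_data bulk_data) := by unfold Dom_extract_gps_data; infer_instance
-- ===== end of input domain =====

-- B replaces A's single pass over the lines with three independent last-match scans (one helper per key); objective: simpler.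

-- ===== PORT A =====
-- one pass maintaining the three accumulators (latitude, longitude, accuracy) together
def pvStepA (s : String × String × String) (line : String) : String × String × String :=
  let s1 := if PySem.Str.startswith line "Latitude           : " then
              (PySem.Str.slice line (some 21) none, s.2.1, s.2.2) else s
  let s2 := if PySem.Str.startswith line "Longitude          : " then
              (s1.1, PySem.Str.slice line (some 21) none, s1.2.2) else s1
  if PySem.Str.startswith line "HorizontalAccuracy : " then
    (s2.1, s2.2.1, PySem.Str.slice line (some 21) none) else s2

def extract_gps_data (bulk_data : List String) : List (String × String) :=
  let r := bulk_data.foldl pvStepA ("", "", "")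
  [("latitude", PySem.Str.strip r.1),
   ("longitude", PySem.Str.strip r.2.1),
   ("accuracy", PySem.Str.strip r.2.2)]

-- ===== PORT B =====
-- helper: stripped value of the LAST line starting with the prefix ("" if none)
def pvLastValue (bulk_data : List String) (pre : String) : String :=
  PySem.Str.strip (bulk_data.foldl
    (fun val line => if PySem.Str.startswith line pre then PySem.Str.slice line (some 21) none else val) "")

def extract_gps_data_alt (bulk_data : List String) : List (String × String) :=
  [("latitude", pvLastValue bulk_data "Latitude           : "),
   ("longitude", pvLastValue bulk_data "Longitude          : "),
   ("accuracy", pvLastValue bulk_data "HorizontalAccuracy : ")]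

-- ===== PRECONDITION & SPEC =====
def Spec_extract_gps_data (bulk_data : List String) (out : List (String × String)) : Prop := out = extract_gps_data_alt bulk_data
instance (bulk_data : List String) (out : List (String × String)) : Decidable (Spec_extract_gps_data bulk_data out) := by unfold Spec_extract_gps_data; infer_instance

-- ===== CLAIM (what is proved, stated in full; the proofs are below) =====
def Claim_equal_extract_gps_data : Prop := ∀ (bulk_data : List String), Dom_extract_gps_data bulk_data → Spec_extract_gps_data bulk_data (extract_gps_data bulk_data)

-- ===== LEMMAS AND PROOFS =====
-- each component of A's combined fold equals the corresponding independent last-match fold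
theorem pv_fold_split (bulk_data : List String) (a b c : String) :
    bulk_data.foldl pvStepA (a, b, c) =
    (bulk_data.foldl (fun val line => if PySem.Str.startswith line "Latitude           : " then PySem.Str.slice line (some 21) none else val) a,
     bulk_data.foldl (fun val line => if PySem.Str.startswith line "Longitude          : " then PySem.Str.slice line (some 21) none else val) b,
     bulk_data.foldl (fun val line => if PySem.Str.startswith line "HorizontalAccuracy : " then PySem.Str.slice line (some 21) none else val) c) := by
  induction bulk_data generalizing a b c with
  | nil => rfl
  | cons hd tl ih =>
      simp only [List.foldl_cons]
      rw [ih]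
      unfold pvStepA
      split_ifs <;> rfl

-- ===== VERDICT (by name: the statement is the Claim_ definition above) =====
theorem extract_gps_data_spec : Claim_equal_extract_gps_data := by
  intro bulk_data _
  unfold Spec_extract_gps_data extract_gps_data extract_gps_data_alt pvLastValue
  rw [pv_fold_split]
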